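-- pv_equiv track=rewrite | github.com/timgzhou/ever-changing-modality | res/results_BL.py | _apply_multirow
-- ===== SOURCE A (Python) =====
-- _MODALITY_DISPLAY = {
--     's2-rgb':   r'$\mathrm{S2}_{rgb}$',
--     's2-norgb': r'$\mathrm{S2}_{\neg rgb}$',
--     's2':       r'$\mathrm{S2}$',
--     's1':       r'$\mathrm{S1}$',
-- }
--
-- def _render_modality(s):
--     return _MODALITY_DISPLAY.get(str(s).lower(), str(s))
--
-- def _escape(s):
--     s = _render_modality(s)
--     return s.replace('→', r'$\to$').replace('±', r'$\pm$')
--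
-- def _multirow(n, s):
--     return rf'\multirow{{{n}}}{{*}}{{{s}}}'
--
-- def _apply_multirow(col_values):
--     result = []
--     i = 0
--     while i < len(col_values):
--         val = col_values[i]
--         j = i + 1
--         while j < len(col_values) and col_values[j] == val:
--             j += 1
--         n = j - i
--         result.append(_multirow(n, _escape(val)) if n > 1 else _escape(val))
--         result.extend([''] * (n - 1))
--         i = j
--     return result
-- ===== SOURCE B (Python) =====
-- _MODALITY_DISPLAY = {
--     's2-rgb':   r'$\mathrm{S2}_{rgb}$',
--     's2-norgb': r'$\mathrm{S2}_{\neg rgb}$',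
--     's2':       r'$\mathrm{S2}$',
--     's1':       r'$\mathrm{S1}$',
-- }
--
-- def _render_modality(s):
--     return _MODALITY_DISPLAY.get(str(s).lower(), str(s))
--
-- def _escape(s):
--     s = _render_modality(s)
--     return s.replace('→', r'$\to$').replace('±', r'$\pm$')
--
-- def _multirow(n, s):
--     return rf'\multirow{{{n}}}{{*}}{{{s}}}'
--
-- def _apply_multirow(col_values):
--     # one linear pass builds the run-length encoding (no inner index scan),
--     # then a second pass renders each run
--     runs = []
--     for v in col_values:
--         if runs and runs[-1][0] == v:
--             runs[-1][1] += 1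
--         else:
--             runs.append([v, 1])
--     out = []
--     for v, n in runs:
--         out.append(_multirow(n, _escape(v)) if n > 1 else _escape(v))
--         out.extend([''] * (n - 1))
--     return out
-- ===== Notes on version B (the rewrite author's own statement) =====
-- stated objective: alternative
-- what changed: Replaces the index-based while loop with nested run scanning by a two-phase pass: first build a run-length encoding in one linear pass (extending the last run or starting a new one), then render each (value, count) run; no index variables or inner scans remain.
import Mathlib
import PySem

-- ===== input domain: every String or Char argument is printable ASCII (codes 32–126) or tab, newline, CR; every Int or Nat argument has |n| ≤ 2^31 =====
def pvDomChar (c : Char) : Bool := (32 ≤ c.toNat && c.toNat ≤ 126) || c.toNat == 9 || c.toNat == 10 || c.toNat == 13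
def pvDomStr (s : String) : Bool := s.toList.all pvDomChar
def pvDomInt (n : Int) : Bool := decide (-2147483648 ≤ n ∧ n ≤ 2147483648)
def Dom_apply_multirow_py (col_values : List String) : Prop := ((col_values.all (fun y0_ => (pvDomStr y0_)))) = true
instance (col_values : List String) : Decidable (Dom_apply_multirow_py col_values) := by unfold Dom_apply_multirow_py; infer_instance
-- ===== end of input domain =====

-- B replaces A's index-based nested while-loop scanning with a two-phase pass:
-- build a run-length encoding in one linear pass, then render each run (alternative decomposition).


-- ===== PORT A =====
-- module helpers shared by both Pythons (identical in Source A and Source B)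
def renderModalityPy (s : String) : String :=
  (PySem.Dict.ofList [("s2-rgb", "$\\mathrm{S2}_{rgb}$"), ("s2-norgb", "$\\mathrm{S2}_{\\neg rgb}$"),
                      ("s2", "$\\mathrm{S2}$"), ("s1", "$\\mathrm{S1}$")]).getD (PySem.Str.lower s) s

def escapePy (s : String) : String :=
  PySem.Str.replace (PySem.Str.replace (renderModalityPy s) "→" "$\\to$") "±" "$\\pm$"

def multirowPy (n : Nat) (s : String) : String :=
  "\\multirow{" ++ PySem.Int.toStr (n : Int) ++ "}{*}{" ++ s ++ "}"

-- inner while: j advances while col_values[j] == val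
def innerA (cv : List String) (val : String) (j : Nat) : Nat :=
  if h : j < cv.length then
    if cv[j] == val then innerA cv val (j + 1) else j
  else j
termination_by cv.length - j

-- termination fact for the outer loop: the inner scan advances past its start
theorem innerA_ge (cv : List String) (val : String) (j : Nat) : j ≤ innerA cv val j := by
  rw [innerA]
  by_cases h : j < cv.length
  · simp only [dif_pos h]
    by_cases hb : cv[j] == val
    · have := innerA_ge cv val (j + 1)
      simp only [if_pos hb]
      omega
    · simp [hb]
  · simp [h]
termination_by cv.length - j
decreasing_by omega

-- outer while over index i, appending to result
def outerA (cv : List String) (result : List String) (i : Nat) : List String :=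
  if h : i < cv.length then
    let val := cv[i]
    let j := innerA cv val (i + 1)
    let n := j - i
    outerA cv (result ++ [if n > 1 then multirowPy n (escapePy val) else escapePy val]
                      ++ List.replicate (n - 1) "") j
  else result
termination_by cv.length - i
decreasing_by have := innerA_ge cv (cv[i]'h) (i + 1); omega

def apply_multirow_py (col_values : List String) : List String :=
  outerA col_values [] 0

-- ===== PORT B =====
-- phase 1: run-length encoding (extend last run or append a new one)
def stepRuns (runs : List (String × Nat)) (v : String) : List (String × Nat) :=
  match runs.getLast? with
  | some (w, n) => if w == v then runs.dropLast ++ [(w, n + 1)] else runs ++ [(v, 1)]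
  | none => runs ++ [(v, 1)]

def apply_multirow_py_alt (col_values : List String) : List String :=
  let runs := col_values.foldl stepRuns []
  runs.foldl (fun out r =>
    out ++ (if r.2 > 1 then multirowPy r.2 (escapePy r.1) else escapePy r.1)
        :: List.replicate (r.2 - 1) "") []

-- ===== PRECONDITION & SPEC =====
def Spec_apply_multirow_py (col_values : List String) (out : List String) : Prop := out = apply_multirow_py_alt col_values
instance (col_values : List String) (out : List String) : Decidable (Spec_apply_multirow_py col_values out) := by unfold Spec_apply_multirow_py; infer_instance

-- ===== CLAIM (what is proved, stated in full; the proofs are below) =====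
def Claim_equal_apply_multirow_py : Prop := ∀ (col_values : List String), Dom_apply_multirow_py col_values → Spec_apply_multirow_py col_values (apply_multirow_py col_values)

-- ===== LEMMAS AND PROOFS =====

-- number of leading elements equal (==) to val
def countLead (val : String) : List String → Nat
  | [] => 0
  | x :: r => if x == val then 1 + countLead val r else 0

-- reference run-length encoding
def rle : List String → List (String × Nat)
  | [] => []
  | v :: rest =>
    (v, 1 + countLead v rest) :: rle (rest.drop (countLead v rest))
termination_by l => l.length
decreasing_by
  simp only [List.length_cons]
  have := List.length_drop (l := rest) (i := countLead v rest)
  omega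

-- reference rendering of runs
def render (rs : List (String × Nat)) : List String :=
  rs.flatMap (fun r =>
    (if r.2 > 1 then multirowPy r.2 (escapePy r.1) else escapePy r.1)
      :: List.replicate (r.2 - 1) "")

-- B's phase-1 fold, in recursion form
def extRle (v : String) (n : Nat) : List String → List (String × Nat)
  | [] => [(v, n)]
  | x :: r => if x == v then extRle v (n + 1) r else (v, n) :: extRle x 1 r

theorem innerA_eq (cv : List String) (val : String) (j : Nat) :
    innerA cv val j = j + countLead val (cv.drop j) := by
  rw [innerA]
  by_cases h : j < cv.length
  · have hd : cv.drop j = cv[j] :: cv.drop (j + 1) := (List.getElem_cons_drop h).symm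
    simp only [dif_pos h]
    by_cases hb : cv[j] == val
    · rw [if_pos hb, innerA_eq cv val (j + 1), hd]
      simp [countLead, hb]
      omega
    · rw [if_neg hb, hd]
      simp [countLead, hb]
  · have hd : cv.drop j = [] := List.drop_eq_nil_of_le (by omega)
    simp [h, hd, countLead]
termination_by cv.length - j
decreasing_by omega

theorem outerA_eq_aux (fuel : Nat) : ∀ (cv acc : List String) (i : Nat),
    cv.length - i ≤ fuel → outerA cv acc i = acc ++ render (rle (cv.drop i)) := by
  induction fuel with
  | zero =>
    intro cv acc i hf
    have h : ¬ i < cv.length := by omega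
    rw [outerA]
    have hd : cv.drop i = [] := List.drop_eq_nil_of_le (by omega)
    simp [h, hd, rle, render]
  | succ fuel ih =>
    intro cv acc i hf
    rw [outerA]
    by_cases h : i < cv.length
    · simp only [dif_pos h]
      have hd : cv.drop i = cv[i] :: cv.drop (i + 1) := (List.getElem_cons_drop h).symm
      set k := countLead (cv[i]) (cv.drop (i + 1)) with hk
      have hj : innerA cv (cv[i]) (i + 1) = i + 1 + k := by rw [innerA_eq]
      rw [ih cv _ (innerA cv (cv[i]) (i + 1)) (by omega)]
      rw [hd, rle, ← hk]
      have hdj : cv.drop (innerA cv (cv[i]) (i + 1)) = (cv.drop (i + 1)).drop k := by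
        rw [hj, List.drop_drop]
      have hn : innerA cv (cv[i]) (i + 1) - i = k + 1 := by omega
      rw [hdj, hn]
      simp only [render, List.flatMap_cons]
      have h1 : 1 + k = k + 1 := by omega
      simp [h1, List.append_assoc]
    · have hd : cv.drop i = [] := List.drop_eq_nil_of_le (by omega)
      rw [hd, rle]
      simp [h, render]

theorem outerA_eq (cv acc : List String) (i : Nat) :
    outerA cv acc i = acc ++ render (rle (cv.drop i)) :=
  outerA_eq_aux (cv.length - i) cv acc i (le_refl _)

theorem foldl_stepRuns (xs : List String) (rs : List (String × Nat)) (v : String) (n : Nat) :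
    List.foldl stepRuns (rs ++ [(v, n)]) xs = rs ++ extRle v n xs := by
  induction xs generalizing rs v n with
  | nil => simp [extRle]
  | cons x r ih =>
    simp only [List.foldl_cons, stepRuns, List.getLast?_concat, List.dropLast_concat, extRle]
    by_cases hb : v == x
    · have hb' : (x == v) = true := by simp_all
      simp [hb, hb', ih]
    · have hb' : (x == v) = false := by simp_all [BEq.comm]
      rw [if_neg hb, ih]
      simp [hb']
theorem extRle_eq (xs : List String) (v : String) (n : Nat) :
    extRle v n xs = (v, n + countLead v xs) :: rle (xs.drop (countLead v xs)) := by
  induction xs generalizing v n with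
  | nil => simp [extRle, countLead, rle]
  | cons x r ih =>
    by_cases hb : x == v
    · have hv : x = v := by simpa using hb
      subst hv
      simp only [extRle, hb, if_true, countLead, ih]
      have h1 : 1 + countLead x r = countLead x r + 1 := by omega
      rw [h1, List.drop_succ_cons]
      have h2 : n + 1 + countLead x r = n + (countLead x r + 1) := by omega
      rw [h2]
    · simp only [extRle, hb, Bool.false_eq_true, if_false, countLead, ih,
        List.drop_zero, Nat.add_zero]
      rw [show rle (x :: r) = (x, 1 + countLead x r) :: rle (r.drop (countLead x r)) from by rw [rle]]

theorem foldl_render (rs : List (String × Nat)) (acc : List String) :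
    List.foldl (fun out r =>
      out ++ (if r.2 > 1 then multirowPy r.2 (escapePy r.1) else escapePy r.1)
          :: List.replicate (r.2 - 1) "") acc rs = acc ++ render rs := by
  induction rs generalizing acc with
  | nil => simp [render]
  | cons r rest ih => simp [render, ih]

theorem alt_eq (cv : List String) : apply_multirow_py_alt cv = render (rle cv) := by
  unfold apply_multirow_py_alt
  rw [foldl_render]
  simp only [List.nil_append]
  congr 1
  cases cv with
  | nil => rw [rle]; rfl
  | cons x r =>
    have h0 : stepRuns [] x = [] ++ [(x, 1)] := by simp [stepRuns]
    rw [List.foldl_cons, h0, foldl_stepRuns, extRle_eq]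
    rw [show rle (x :: r) = (x, 1 + countLead x r) :: rle (r.drop (countLead x r)) from by rw [rle]]
    simp

-- ===== VERDICT (by name: the statement is the Claim_ definition above) =====
theorem apply_multirow_py_spec : Claim_equal_apply_multirow_py := by
  intro cv _
  unfold Spec_apply_multirow_py apply_multirow_py
  rw [outerA_eq, alt_eq]
  simp
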